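-- pv_equiv track=rewrite | github.com/alex-c2c/learning-python | src/codewars/bomb_has_been_planted.py | bomb_has_been_planted
-- ===== SOURCE A (Python) =====
-- def bomb_has_been_planted(m:list, time:int) -> bool:
--     pos_dict:dict[str, tuple[int, int]] = get_all_pos(m)
--
--     if pos_dict.get("B", None) is None:
--         return True
--
--     if pos_dict.get("CT", None) is None:
--         return False
--
--     scenario_dict = {}
--     if pos_dict.get("K", None) is not None:
--         scenario_dict["use_kit"] = get_step_count(pos_dict["CT"], pos_dict["K"]) + get_step_count(pos_dict["K"], pos_dict["B"]) + 5
--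
--     scenario_dict["skip_kit"] = get_step_count(pos_dict["CT"], pos_dict["B"]) + 10
--
--     is_in_time:bool = False
--     for k in scenario_dict.keys():
--         if scenario_dict[k] <= time:
--             is_in_time = True
--             break
--
--     return is_in_time
--
-- def get_all_pos(m:list[list[str]]) -> dict[str, tuple[int, int]]:
--     pos_dict = {}
--
--     for y in range(len(m)):
--         for x in range(len(m[y])):
--             if m[y][x] == "K":
--                 pos_dict["K"] = (x, y)
--             elif m[y][x] == "CT":
--                 pos_dict["CT"] = (x, y)
--             elif m[y][x] == "B":
--                 pos_dict["B"] = (x, y)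
--
--     return pos_dict
--
-- def get_step_count(source:tuple[int, int], dest:tuple[int, int]) -> int:
--     current_x:int = source[0]
--     current_y:int = source[1]
--     step_count:int = 0
--
--     while True:
--         if current_x == dest[0] and current_y == dest[1]:
--             break
--
--         if current_x < dest[0]:
--             current_x += 1
--         elif current_x > dest[0]:
--             current_x -= 1
--
--         if current_y < dest[1]:
--             current_y += 1
--         elif current_y > dest[1]:
--             current_y -= 1
--
--         step_count += 1
--
--     return step_count
-- ===== SOURCE B (Python) =====
-- def bomb_has_been_planted(m: list, time: int) -> bool:
--     b = ct = k = None
--     for y, row in enumerate(m):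
--         for x, cell in enumerate(row):
--             if cell == "B":
--                 b = (x, y)
--             elif cell == "CT":
--                 ct = (x, y)
--             elif cell == "K":
--                 k = (x, y)
--     if b is None:
--         return True
--     if ct is None:
--         return False
--     if k is not None and _cheb(ct, k) + _cheb(k, b) + 5 <= time:
--         return True
--     return _cheb(ct, b) + 10 <= time
--
--
-- def _cheb(p, q):
--     return max(abs(p[0] - q[0]), abs(p[1] - q[1]))
-- ===== Notes on version B (the rewrite author's own statement) =====
-- stated objective: simpler
-- what changed: Replaces the stepping while-loop distance helper with the closed-form Chebyshev distance max(|dx|,|dy|) and the dict-of-positions plus scenario-dict loop with three plain position variables and direct comparisons.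
import Mathlib
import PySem

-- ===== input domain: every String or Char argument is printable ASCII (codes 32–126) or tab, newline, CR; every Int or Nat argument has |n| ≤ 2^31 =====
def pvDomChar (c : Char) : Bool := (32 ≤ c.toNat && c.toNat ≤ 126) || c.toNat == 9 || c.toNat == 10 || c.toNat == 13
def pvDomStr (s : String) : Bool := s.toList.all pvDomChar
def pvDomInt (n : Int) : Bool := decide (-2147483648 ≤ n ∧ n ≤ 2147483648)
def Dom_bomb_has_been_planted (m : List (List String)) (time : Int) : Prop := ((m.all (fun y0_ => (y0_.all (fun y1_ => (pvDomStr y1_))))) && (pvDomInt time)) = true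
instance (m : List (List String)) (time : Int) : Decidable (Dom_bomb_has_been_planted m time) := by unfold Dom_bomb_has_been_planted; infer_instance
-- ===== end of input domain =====

-- B replaces A's stepping while-loop with the closed-form Chebyshev distance and A's
-- position/scenario dicts with three plain option values and direct comparisons (objective: simpler).

-- ===== PORT A =====
-- inner loop of get_all_pos: 'for x in range(len(m[y]))' with m[y][x] lookups, as a fold over the row
def pvA_get_all_pos_row (y : Int) : Int → List String → PySem.Dict String (Int × Int) → PySem.Dict String (Int × Int)
  | _, [], d => d
  | x, c :: cs, d =>
      pvA_get_all_pos_row y (x + 1) cs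
        (if c == "K" then d.insert "K" (x, y)
         else if c == "CT" then d.insert "CT" (x, y)
         else if c == "B" then d.insert "B" (x, y)
         else d)

def pvA_get_all_pos_rows : Int → List (List String) → PySem.Dict String (Int × Int) → PySem.Dict String (Int × Int)
  | _, [], d => d
  | y, r :: rs, d => pvA_get_all_pos_rows (y + 1) rs (pvA_get_all_pos_row y 0 r d)

def pvA_get_all_pos (m : List (List String)) : PySem.Dict String (Int × Int) :=
  pvA_get_all_pos_rows 0 m PySem.Dict.empty

-- the 'while True' stepping loop of get_step_count, literal: state (current_x, current_y, step_count);
-- fuel is only a structural totality guard, chosen below as an upper bound on the loop's iterations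
def pvA_step_loop (fuel : Nat) (dx dy cx cy count : Int) : Int :=
  match fuel with
  | 0 => count
  | fuel + 1 =>
    if cx = dx ∧ cy = dy then count
    else
      pvA_step_loop fuel dx dy
        (if cx < dx then cx + 1 else if dx < cx then cx - 1 else cx)
        (if cy < dy then cy + 1 else if dy < cy then cy - 1 else cy)
        (count + 1)

def pvA_get_step_count (source dest : Int × Int) : Int :=
  pvA_step_loop ((source.1 - dest.1).natAbs + (source.2 - dest.2).natAbs)
    dest.1 dest.2 source.1 source.2 0

def bomb_has_been_planted (m : List (List String)) (time : Int) : Bool :=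
  let pos_dict := pvA_get_all_pos m
  match pos_dict.get? "B" with
  | none => true
  | some bpos =>
    match pos_dict.get? "CT" with
    | none => false
    | some ctpos =>
      let scenario_dict : PySem.Dict String Int :=
        match pos_dict.get? "K" with
        | some kpos =>
            (PySem.Dict.empty).insert "use_kit"
              (pvA_get_step_count ctpos kpos + pvA_get_step_count kpos bpos + 5)
        | none => PySem.Dict.empty
      let scenario_dict := scenario_dict.insert "skip_kit" (pvA_get_step_count ctpos bpos + 10)
      -- 'for k in scenario_dict.keys(): if ... break' as a fold that keeps the first hit
      scenario_dict.keys.foldl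
        (fun b k => if b then b else decide (scenario_dict.getD k 0 ≤ time)) false

-- ===== PORT B =====
def pvB_cheb (p q : Int × Int) : Int := max |p.1 - q.1| |p.2 - q.2|

-- 'for x, cell in enumerate(row)' ported as index-carrying recursion (exact)
def pvB_scan_row (y : Nat) : Nat → List String →
    Option (Int × Int) × Option (Int × Int) × Option (Int × Int) →
    Option (Int × Int) × Option (Int × Int) × Option (Int × Int)
  | _, [], s => s
  | x, c :: cs, s =>
      pvB_scan_row y (x + 1) cs
        (if c == "B" then (some ((x : Int), (y : Int)), s.2.1, s.2.2)
         else if c == "CT" then (s.1, some ((x : Int), (y : Int)), s.2.2)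
         else if c == "K" then (s.1, s.2.1, some ((x : Int), (y : Int)))
         else s)

def pvB_scan : Nat → List (List String) →
    Option (Int × Int) × Option (Int × Int) × Option (Int × Int) →
    Option (Int × Int) × Option (Int × Int) × Option (Int × Int)
  | _, [], s => s
  | y, r :: rs, s => pvB_scan (y + 1) rs (pvB_scan_row y 0 r s)

def bomb_has_been_planted_alt (m : List (List String)) (time : Int) : Bool :=
  match pvB_scan 0 m (none, none, none) with
  | (none, _, _) => true
  | (some _, none, _) => false
  | (some b, some ct, k?) =>
      if (match k? with
          | some k => decide (pvB_cheb ct k + pvB_cheb k b + 5 ≤ time)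
          | none => false) then true
      else decide (pvB_cheb ct b + 10 ≤ time)

-- ===== PRECONDITION & SPEC =====
def Spec_bomb_has_been_planted (m : List (List String)) (time : Int) (out : Bool) : Prop := out = bomb_has_been_planted_alt m time
instance (m : List (List String)) (time : Int) (out : Bool) : Decidable (Spec_bomb_has_been_planted m time out) := by unfold Spec_bomb_has_been_planted; infer_instance

-- ===== CLAIM (what is proved, stated in full; the proofs are below) =====
def Claim_equal_bomb_has_been_planted : Prop := ∀ (m : List (List String)) (time : Int), Dom_bomb_has_been_planted m time → Spec_bomb_has_been_planted m time (bomb_has_been_planted m time)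

-- ===== LEMMAS AND PROOFS =====

-- A's stepping loop, run with enough fuel, computes count + Chebyshev distance
theorem pvA_step_loop_eq (dx dy : Int) : ∀ (fuel : Nat) cx cy count,
    (cx - dx).natAbs + (cy - dy).natAbs ≤ fuel →
    pvA_step_loop fuel dx dy cx cy count = count + max |cx - dx| |cy - dy| := by
  intro fuel
  induction fuel with
  | zero =>
      intro cx cy count h
      have h1 : cx = dx := by omega
      have h2 : cy = dy := by omega
      subst h1; subst h2
      simp [pvA_step_loop]
  | succ n ih =>
      intro cx cy count h
      rw [pvA_step_loop]
      by_cases heq : cx = dx ∧ cy = dy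
      · obtain ⟨h1, h2⟩ := heq
        subst h1; subst h2
        simp
      · rw [if_neg heq, ih]
        · split_ifs <;> simp only [Int.abs_eq_natAbs] <;> omega
        · split_ifs <;> omega

theorem pvA_get_step_count_eq (s d : Int × Int) :
    pvA_get_step_count s d = pvB_cheb s d := by
  simp [pvA_get_step_count, pvB_cheb, pvA_step_loop_eq _ _ _ _ _ _ (le_refl _)]

-- scan invariant: A's dict lookups track B's three options
def pvInv (d : PySem.Dict String (Int × Int))
    (s : Option (Int × Int) × Option (Int × Int) × Option (Int × Int)) : Prop :=
  d.get? "B" = s.1 ∧ d.get? "CT" = s.2.1 ∧ d.get? "K" = s.2.2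

theorem pvInv_row (y : Nat) : ∀ (cs : List String) (x : Nat) d s, pvInv d s →
    pvInv (pvA_get_all_pos_row (y : Int) (x : Int) cs d) (pvB_scan_row y x cs s) := by
  intro cs
  induction cs with
  | nil => intro x d s h; exact h
  | cons c rest ih =>
      intro x d s h
      obtain ⟨h1, h2, h3⟩ := h
      rw [pvA_get_all_pos_row, pvB_scan_row]
      have : ((x : Nat) + 1 : Int) = ((x + 1 : Nat) : Int) := by push_cast; ring
      rw [this]
      apply ih
      by_cases hK : c = "K" <;> by_cases hCT : c = "CT" <;> by_cases hB : c = "B" <;>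
        simp_all [pvInv, PySem.Dict.get?_insert]

theorem pvInv_rows : ∀ (rs : List (List String)) (y : Nat) d s, pvInv d s →
    pvInv (pvA_get_all_pos_rows (y : Int) rs d) (pvB_scan y rs s) := by
  intro rs
  induction rs with
  | nil => intro y d s h; exact h
  | cons r rest ih =>
      intro y d s h
      rw [pvA_get_all_pos_rows, pvB_scan]
      have : ((y : Nat) + 1 : Int) = ((y + 1 : Nat) : Int) := by push_cast; ring
      rw [this]
      exact ih _ _ _ (by exact_mod_cast pvInv_row y r 0 d s h)

theorem bomb_has_been_planted_spec : Claim_equal_bomb_has_been_planted := by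
  intro m time _
  unfold Spec_bomb_has_been_planted bomb_has_been_planted bomb_has_been_planted_alt
  have hinv : pvInv (pvA_get_all_pos m) (pvB_scan 0 m (none, none, none)) := by
    have := pvInv_rows m 0 PySem.Dict.empty (none, none, none)
      (by simp [pvInv, PySem.Dict.get?_empty])
    simpa [pvA_get_all_pos] using this
  obtain ⟨hB, hCT, hK⟩ := hinv
  rcases hs : pvB_scan 0 m (none, none, none) with ⟨b?, ct?, k?⟩
  rw [hs] at hB hCT hK
  simp only at hB hCT hK
  cases b? with
  | none => simp [hB]
  | some b =>
    cases ct? with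
    | none => simp [hB, hCT]
    | some ct =>
      cases k? with
      | none =>
          simp only [hB, hCT, hK]
          simp [pvA_get_step_count_eq, PySem.Dict.empty, PySem.Dict.insert,
                PySem.Dict.keys, PySem.Dict.getD, PySem.Dict.get?, PySem.Dict.contains]
      | some k =>
          simp only [hB, hCT, hK]
          by_cases hu : pvB_cheb ct k + pvB_cheb k b + 5 ≤ time <;>
            simp [hu, pvA_get_step_count_eq, PySem.Dict.empty, PySem.Dict.insert,
                  PySem.Dict.keys, PySem.Dict.getD, PySem.Dict.get?, PySem.Dict.contains]
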